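-- pv_equiv track=rewrite | github.com/auronisback/da4vid_pipeline | da4vid/metrics/dssp.py | __count_ss_from_seq
-- ===== SOURCE A (Python) =====
-- def __count_ss_from_seq(ss_seq: str) -> int:
--   act = '-'
--   count = 0
--   for c in ss_seq:
--     if c != act:
--       act = c
--       if c != '-':
--         count += 1
--   return count
-- ===== SOURCE B (Python) =====
-- def __count_ss_from_seq(ss_seq: str) -> int:
--   # Run-consuming stack algorithm: pop the leader of each maximal run of equal
--   # characters, count it if it is not a gap, then discard the rest of its run.
--   stack = list(reversed(ss_seq))
--   count = 0
--   while stack: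
--     c = stack.pop()
--     if c != '-':
--       count += 1
--     while stack and stack[-1] == c:
--       stack.pop()
--   return count
-- ===== Notes on version B (the rewrite author's own statement) =====
-- stated objective: alternative
-- what changed: Replaces A's per-character state machine (tracking the previous char in `act`) with a run-consuming stack algorithm: pop the leader of each maximal run of equal characters, count it unless it is '-', and discard the remainder of its run with an inner loop.
import Mathlib
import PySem

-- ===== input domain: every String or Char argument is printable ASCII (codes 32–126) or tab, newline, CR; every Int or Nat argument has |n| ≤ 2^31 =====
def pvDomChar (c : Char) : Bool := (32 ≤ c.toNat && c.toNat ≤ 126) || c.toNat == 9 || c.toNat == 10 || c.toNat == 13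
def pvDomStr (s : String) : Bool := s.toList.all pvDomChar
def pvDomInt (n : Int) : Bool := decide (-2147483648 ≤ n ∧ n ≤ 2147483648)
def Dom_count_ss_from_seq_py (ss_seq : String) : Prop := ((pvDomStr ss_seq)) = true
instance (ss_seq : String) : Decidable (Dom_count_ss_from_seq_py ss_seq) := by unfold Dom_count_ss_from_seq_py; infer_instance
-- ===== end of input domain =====

-- B replaces A's per-character state machine with a run-consuming stack loop:
-- pop each run's leader, count it unless '-', discard the rest of its run; same cost.

-- ===== PORT A =====
def count_ss_from_seq_py (ss_seq : String) : Int :=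
  (ss_seq.toList.foldl
    (fun (s : Char × Int) c =>
      if c ≠ s.1 then (c, if c ≠ '-' then s.2 + 1 else s.2) else s)
    ('-', 0)).2

-- ===== PORT B =====
-- inner `while stack and stack[-1] == c: stack.pop()` — discards the rest of c's run
def pvAltSkip (c : Char) : List Char → List Char
  | [] => []
  | d :: rest => if d == c then pvAltSkip c rest else d :: rest

theorem pvAltSkip_length_le (c : Char) (l : List Char) :
    (pvAltSkip c l).length ≤ l.length := by
  induction l with
  | nil => simp [pvAltSkip]
  | cons d rest ih =>
    simp only [pvAltSkip]
    split
    · exact le_trans ih (Nat.le_succ _)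
    · simp

-- outer `while stack:` loop; the stack (string reversed, popped from the end)
-- yields the characters in original order, so it is the list consumed head-first
def pvAltGo : List Char → Int → Int
  | [], count => count
  | c :: rest, count =>
      pvAltGo (pvAltSkip c rest) (if c ≠ '-' then count + 1 else count)
termination_by l => l.length
decreasing_by simpa using Nat.lt_succ_of_le (pvAltSkip_length_le c rest)

def count_ss_from_seq_py_alt (ss_seq : String) : Int :=
  pvAltGo ss_seq.toList 0

-- ===== PRECONDITION & SPEC =====
def Spec_count_ss_from_seq_py (ss_seq : String) (out : Int) : Prop := out = count_ss_from_seq_py_alt ss_seq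
instance (ss_seq : String) (out : Int) : Decidable (Spec_count_ss_from_seq_py ss_seq out) := by unfold Spec_count_ss_from_seq_py; infer_instance

-- ===== CLAIM (what is proved, stated in full; the proofs are below) =====
def Claim_equal_count_ss_from_seq_py : Prop := ∀ (ss_seq : String), Dom_count_ss_from_seq_py ss_seq → Spec_count_ss_from_seq_py ss_seq (count_ss_from_seq_py ss_seq)

-- ===== LEMMAS AND PROOFS =====
theorem fold_eq_altGo (l : List Char) (act : Char) (k : Int) :
    (l.foldl
      (fun (s : Char × Int) c =>
        if c ≠ s.1 then (c, if c ≠ '-' then s.2 + 1 else s.2) else s)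
      (act, k)).2
    = pvAltGo (pvAltSkip act l) k := by
  induction l generalizing act k with
  | nil => simp [pvAltSkip, pvAltGo]
  | cons c rest ih =>
    by_cases hc : c = act
    · subst hc
      simpa [pvAltSkip] using ih c k
    · simp only [List.foldl_cons, ne_eq, hc, not_false_eq_true, if_true]
      rw [ih c]
      simp [pvAltSkip, pvAltGo, hc, Ne.symm]

theorem altGo_skip_dash (l : List Char) (k : Int) :
    pvAltGo (pvAltSkip '-' l) k = pvAltGo l k := by
  cases l with
  | nil => rfl
  | cons c rest =>
    by_cases hc : c = '-'
    · subst hc; simp [pvAltSkip, pvAltGo]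
    · simp [pvAltSkip, hc]

-- ===== VERDICT (by name: the statement is the Claim_ definition above) =====
theorem count_ss_from_seq_py_spec : Claim_equal_count_ss_from_seq_py := by
  intro s _
  unfold Spec_count_ss_from_seq_py count_ss_from_seq_py count_ss_from_seq_py_alt
  rw [fold_eq_altGo, altGo_skip_dash]
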